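-- pv_equiv track=rewrite | github.com/onestone11/kosa-study-tigger | 엄마호랑이반/16주차 문제/박정환/주사위쌓기.py | check
-- ===== SOURCE A (Python) =====
-- def check(dice, b):
--     for i in range(6):
--         if b == dice[i]:
--             break
--     if i == 0: #반대편 5
--         return(dice[5], max(dice[1], dice[2], dice[3], dice[4]))
--     elif i == 1:# 반대편 3
--         return(dice[3], max(dice[0], dice[2], dice[5], dice[4]))
--     elif i == 2:# 반대편 4
--         return(dice[4], max(dice[0], dice[1], dice[3], dice[5]))
--     elif i == 3:# 반대편 1
--         return(dice[1], max(dice[0], dice[2], dice[4], dice[5]))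
--     elif i == 4:# 반대편 2
--         return(dice[2], max(dice[0], dice[1], dice[3], dice[5]))
--     elif i == 5:# 반대편 0
--         return(dice[0], max(dice[1], dice[2], dice[3], dice[4]))
-- ===== SOURCE B (Python) =====
-- def check(dice, b):
--     # dice faces grouped as opposite pairs (front, back): (0,5), (1,3), (2,4)
--     pairs = [(dice[0], dice[5]), (dice[1], dice[3]), (dice[2], dice[4])]
--     found = None
--     for j, (front, back) in enumerate(pairs):
--         if front == b:
--             found = (j, back)
--             break
--     if found is None:
--         for j in (1, 2):
--             if pairs[j][1] == b:
--                 found = (j, pairs[j][0])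
--                 break
--         else:
--             found = (0, dice[0])  # b on face 5 or absent: opposite is dice[0]
--     j, opp = found
--     return (opp, max(v for t, p in enumerate(pairs) if t != j for v in p))
-- ===== Notes on version B (the rewrite author's own statement) =====
-- stated objective: alternative
-- what changed: Reorganises the six faces into the three opposite pairs (0,5),(1,3),(2,4) and scans pair fronts then pair backs to select the matched pair, returning its other member and the max over the two remaining pairs; no face-index permutation or six-way branch.
import Mathlib
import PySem

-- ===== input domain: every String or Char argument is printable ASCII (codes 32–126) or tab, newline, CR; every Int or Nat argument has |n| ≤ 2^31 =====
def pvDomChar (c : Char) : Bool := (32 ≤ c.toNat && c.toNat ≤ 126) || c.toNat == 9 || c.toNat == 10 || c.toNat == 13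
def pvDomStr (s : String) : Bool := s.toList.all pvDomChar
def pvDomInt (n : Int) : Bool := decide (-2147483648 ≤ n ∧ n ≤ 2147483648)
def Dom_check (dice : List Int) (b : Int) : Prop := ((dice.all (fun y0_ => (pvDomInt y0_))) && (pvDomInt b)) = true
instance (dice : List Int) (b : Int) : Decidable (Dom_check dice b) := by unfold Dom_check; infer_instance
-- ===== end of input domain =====

-- B regroups the faces into the three opposite pairs and selects the matched pair by scanning fronts then backs, replacing A's six-way branch (alternative decomposition). Pre_check excludes lists shorter than 6, on which both Pythons raise IndexError.


-- ===== PORT A =====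
-- Index accesses dice[i] use nonnegative literal indices only; under Pre_check (length ≥ 6)
-- List.getD is exact for them (Python raises IndexError on shorter lists, excluded by Pre_check).
def check (dice : List Int) (b : Int) : Int × Int :=
  -- for i in range(6): if b == dice[i]: break   (i = 5 if the loop runs out)
  let i : Nat :=
    if b = dice.getD 0 0 then 0
    else if b = dice.getD 1 0 then 1
    else if b = dice.getD 2 0 then 2
    else if b = dice.getD 3 0 then 3
    else if b = dice.getD 4 0 then 4
    else 5
  if i = 0 then (dice.getD 5 0, max (max (max (dice.getD 1 0) (dice.getD 2 0)) (dice.getD 3 0)) (dice.getD 4 0))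
  else if i = 1 then (dice.getD 3 0, max (max (max (dice.getD 0 0) (dice.getD 2 0)) (dice.getD 5 0)) (dice.getD 4 0))
  else if i = 2 then (dice.getD 4 0, max (max (max (dice.getD 0 0) (dice.getD 1 0)) (dice.getD 3 0)) (dice.getD 5 0))
  else if i = 3 then (dice.getD 1 0, max (max (max (dice.getD 0 0) (dice.getD 2 0)) (dice.getD 4 0)) (dice.getD 5 0))
  else if i = 4 then (dice.getD 2 0, max (max (max (dice.getD 0 0) (dice.getD 1 0)) (dice.getD 3 0)) (dice.getD 5 0))
  else (dice.getD 0 0, max (max (max (dice.getD 1 0) (dice.getD 2 0)) (dice.getD 3 0)) (dice.getD 4 0))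

-- ===== PORT B =====
-- max(generator) on a nonempty sequence, ported value-exactly as a left fold from the head
def pyMaxNE (vs : List Int) : Int :=
  match vs with
  | [] => 0  -- unreachable under Pre_check (the list maxed has 4 elements)
  | v :: rest => rest.foldl max v

def pyEnumerate (xs : List (Int × Int)) : List (Nat × (Int × Int)) :=
  (List.range xs.length).zip xs

def check_alt (dice : List Int) (b : Int) : Int × Int :=
  let pairs : List (Int × Int) :=
    [(dice.getD 0 0, dice.getD 5 0), (dice.getD 1 0, dice.getD 3 0), (dice.getD 2 0, dice.getD 4 0)]
  -- first loop: scan pair fronts; second loop: scan backs of pairs 1 and 2, default pair 0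
  let found : Nat × Int :=
    match (pyEnumerate pairs).find? (fun jp => jp.2.1 = b) with
    | some jp => (jp.1, jp.2.2)
    | none =>
      match ([1, 2] : List Nat).find? (fun j => (pairs.getD j (0, 0)).2 = b) with
      | some j => (j, (pairs.getD j (0, 0)).1)
      | none => (0, dice.getD 0 0)
  let rest := ((pyEnumerate pairs).filter (fun tp => tp.1 ≠ found.1)).flatMap (fun tp => [tp.2.1, tp.2.2])
  (found.2, pyMaxNE rest)

-- ===== PRECONDITION & SPEC =====
-- Pre_check excludes lists shorter than 6, on which both Pythons raise IndexError.
def Pre_check (dice : List Int) (b : Int) : Prop := 6 ≤ dice.length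
instance (dice : List Int) (b : Int) : Decidable (Pre_check dice b) := by unfold Pre_check; infer_instance
def pvWitness_check : List Int × Int := ([1, 2, 3, 4, 5, 6], 3)
def Spec_check (dice : List Int) (b : Int) (out : Int × Int) : Prop := out = check_alt dice b
instance (dice : List Int) (b : Int) (out : Int × Int) : Decidable (Spec_check dice b out) := by unfold Spec_check; infer_instance

-- ===== CLAIM (what is proved, stated in full; the proofs are below) =====
def Claim_equal_check : Prop := ∀ (dice : List Int) (b : Int), Dom_check dice b → Pre_check dice b → Spec_check dice b (check dice b)

-- ===== LEMMAS AND PROOFS =====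

-- ===== VERDICT (by name: the statement is the Claim_ definition above) =====
set_option maxHeartbeats 2000000 in
theorem check_spec : Claim_equal_check := by
  intro dice b _ hpre
  unfold Spec_check
  match dice, hpre with
  | a0 :: a1 :: a2 :: a3 :: a4 :: a5 :: rest, _ =>
    by_cases h0 : b = a0
    · by_cases h1 : b = a1
      · by_cases h2 : b = a2
        · by_cases h3 : b = a3
          · by_cases h4 : b = a4
            · simp [check, check_alt, pyMaxNE, pyEnumerate, List.find?, List.filter,
                  show List.range 3 = [0, 1, 2] from rfl, eq_true h0, eq_true h0.symm, eq_true h1, eq_true h1.symm, eq_true h2, eq_true h2.symm, eq_true h3, eq_true h3.symm, eq_true h4, eq_true h4.symm] <;>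
                first | rfl | ac_rfl
            · simp [check, check_alt, pyMaxNE, pyEnumerate, List.find?, List.filter,
                  show List.range 3 = [0, 1, 2] from rfl, eq_true h0, eq_true h0.symm, eq_true h1, eq_true h1.symm, eq_true h2, eq_true h2.symm, eq_true h3, eq_true h3.symm, eq_false h4, eq_false (fun e => h4 (Eq.symm e))] <;>
                first | rfl | ac_rfl
          · by_cases h4 : b = a4
            · simp [check, check_alt, pyMaxNE, pyEnumerate, List.find?, List.filter,
                  show List.range 3 = [0, 1, 2] from rfl, eq_true h0, eq_true h0.symm, eq_true h1, eq_true h1.symm, eq_true h2, eq_true h2.symm, eq_false h3, eq_false (fun e => h3 (Eq.symm e)), eq_true h4, eq_true h4.symm] <;>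
                first | rfl | ac_rfl
            · simp [check, check_alt, pyMaxNE, pyEnumerate, List.find?, List.filter,
                  show List.range 3 = [0, 1, 2] from rfl, eq_true h0, eq_true h0.symm, eq_true h1, eq_true h1.symm, eq_true h2, eq_true h2.symm, eq_false h3, eq_false (fun e => h3 (Eq.symm e)), eq_false h4, eq_false (fun e => h4 (Eq.symm e))] <;>
                first | rfl | ac_rfl
        · by_cases h3 : b = a3
          · by_cases h4 : b = a4
            · simp [check, check_alt, pyMaxNE, pyEnumerate, List.find?, List.filter,
                  show List.range 3 = [0, 1, 2] from rfl, eq_true h0, eq_true h0.symm, eq_true h1, eq_true h1.symm, eq_false h2, eq_false (fun e => h2 (Eq.symm e)), eq_true h3, eq_true h3.symm, eq_true h4, eq_true h4.symm] <;>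
                first | rfl | ac_rfl
            · simp [check, check_alt, pyMaxNE, pyEnumerate, List.find?, List.filter,
                  show List.range 3 = [0, 1, 2] from rfl, eq_true h0, eq_true h0.symm, eq_true h1, eq_true h1.symm, eq_false h2, eq_false (fun e => h2 (Eq.symm e)), eq_true h3, eq_true h3.symm, eq_false h4, eq_false (fun e => h4 (Eq.symm e))] <;>
                first | rfl | ac_rfl
          · by_cases h4 : b = a4
            · simp [check, check_alt, pyMaxNE, pyEnumerate, List.find?, List.filter,
                  show List.range 3 = [0, 1, 2] from rfl, eq_true h0, eq_true h0.symm, eq_true h1, eq_true h1.symm, eq_false h2, eq_false (fun e => h2 (Eq.symm e)), eq_false h3, eq_false (fun e => h3 (Eq.symm e)), eq_true h4, eq_true h4.symm] <;>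
                first | rfl | ac_rfl
            · simp [check, check_alt, pyMaxNE, pyEnumerate, List.find?, List.filter,
                  show List.range 3 = [0, 1, 2] from rfl, eq_true h0, eq_true h0.symm, eq_true h1, eq_true h1.symm, eq_false h2, eq_false (fun e => h2 (Eq.symm e)), eq_false h3, eq_false (fun e => h3 (Eq.symm e)), eq_false h4, eq_false (fun e => h4 (Eq.symm e))] <;>
                first | rfl | ac_rfl
      · by_cases h2 : b = a2
        · by_cases h3 : b = a3
          · by_cases h4 : b = a4
            · simp [check, check_alt, pyMaxNE, pyEnumerate, List.find?, List.filter,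
                  show List.range 3 = [0, 1, 2] from rfl, eq_true h0, eq_true h0.symm, eq_false h1, eq_false (fun e => h1 (Eq.symm e)), eq_true h2, eq_true h2.symm, eq_true h3, eq_true h3.symm, eq_true h4, eq_true h4.symm] <;>
                first | rfl | ac_rfl
            · simp [check, check_alt, pyMaxNE, pyEnumerate, List.find?, List.filter,
                  show List.range 3 = [0, 1, 2] from rfl, eq_true h0, eq_true h0.symm, eq_false h1, eq_false (fun e => h1 (Eq.symm e)), eq_true h2, eq_true h2.symm, eq_true h3, eq_true h3.symm, eq_false h4, eq_false (fun e => h4 (Eq.symm e))] <;>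
                first | rfl | ac_rfl
          · by_cases h4 : b = a4
            · simp [check, check_alt, pyMaxNE, pyEnumerate, List.find?, List.filter,
                  show List.range 3 = [0, 1, 2] from rfl, eq_true h0, eq_true h0.symm, eq_false h1, eq_false (fun e => h1 (Eq.symm e)), eq_true h2, eq_true h2.symm, eq_false h3, eq_false (fun e => h3 (Eq.symm e)), eq_true h4, eq_true h4.symm] <;>
                first | rfl | ac_rfl
            · simp [check, check_alt, pyMaxNE, pyEnumerate, List.find?, List.filter,
                  show List.range 3 = [0, 1, 2] from rfl, eq_true h0, eq_true h0.symm, eq_false h1, eq_false (fun e => h1 (Eq.symm e)), eq_true h2, eq_true h2.symm, eq_false h3, eq_false (fun e => h3 (Eq.symm e)), eq_false h4, eq_false (fun e => h4 (Eq.symm e))] <;>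
                first | rfl | ac_rfl
        · by_cases h3 : b = a3
          · by_cases h4 : b = a4
            · simp [check, check_alt, pyMaxNE, pyEnumerate, List.find?, List.filter,
                  show List.range 3 = [0, 1, 2] from rfl, eq_true h0, eq_true h0.symm, eq_false h1, eq_false (fun e => h1 (Eq.symm e)), eq_false h2, eq_false (fun e => h2 (Eq.symm e)), eq_true h3, eq_true h3.symm, eq_true h4, eq_true h4.symm] <;>
                first | rfl | ac_rfl
            · simp [check, check_alt, pyMaxNE, pyEnumerate, List.find?, List.filter,
                  show List.range 3 = [0, 1, 2] from rfl, eq_true h0, eq_true h0.symm, eq_false h1, eq_false (fun e => h1 (Eq.symm e)), eq_false h2, eq_false (fun e => h2 (Eq.symm e)), eq_true h3, eq_true h3.symm, eq_false h4, eq_false (fun e => h4 (Eq.symm e))] <;>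
                first | rfl | ac_rfl
          · by_cases h4 : b = a4
            · simp [check, check_alt, pyMaxNE, pyEnumerate, List.find?, List.filter,
                  show List.range 3 = [0, 1, 2] from rfl, eq_true h0, eq_true h0.symm, eq_false h1, eq_false (fun e => h1 (Eq.symm e)), eq_false h2, eq_false (fun e => h2 (Eq.symm e)), eq_false h3, eq_false (fun e => h3 (Eq.symm e)), eq_true h4, eq_true h4.symm] <;>
                first | rfl | ac_rfl
            · simp [check, check_alt, pyMaxNE, pyEnumerate, List.find?, List.filter,
                  show List.range 3 = [0, 1, 2] from rfl, eq_true h0, eq_true h0.symm, eq_false h1, eq_false (fun e => h1 (Eq.symm e)), eq_false h2, eq_false (fun e => h2 (Eq.symm e)), eq_false h3, eq_false (fun e => h3 (Eq.symm e)), eq_false h4, eq_false (fun e => h4 (Eq.symm e))] <;>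
                first | rfl | ac_rfl
    · by_cases h1 : b = a1
      · by_cases h2 : b = a2
        · by_cases h3 : b = a3
          · by_cases h4 : b = a4
            · simp [check, check_alt, pyMaxNE, pyEnumerate, List.find?, List.filter,
                  show List.range 3 = [0, 1, 2] from rfl, eq_false h0, eq_false (fun e => h0 (Eq.symm e)), eq_true h1, eq_true h1.symm, eq_true h2, eq_true h2.symm, eq_true h3, eq_true h3.symm, eq_true h4, eq_true h4.symm] <;>
                first | rfl | ac_rfl
            · simp [check, check_alt, pyMaxNE, pyEnumerate, List.find?, List.filter,
                  show List.range 3 = [0, 1, 2] from rfl, eq_false h0, eq_false (fun e => h0 (Eq.symm e)), eq_true h1, eq_true h1.symm, eq_true h2, eq_true h2.symm, eq_true h3, eq_true h3.symm, eq_false h4, eq_false (fun e => h4 (Eq.symm e))] <;>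
                first | rfl | ac_rfl
          · by_cases h4 : b = a4
            · simp [check, check_alt, pyMaxNE, pyEnumerate, List.find?, List.filter,
                  show List.range 3 = [0, 1, 2] from rfl, eq_false h0, eq_false (fun e => h0 (Eq.symm e)), eq_true h1, eq_true h1.symm, eq_true h2, eq_true h2.symm, eq_false h3, eq_false (fun e => h3 (Eq.symm e)), eq_true h4, eq_true h4.symm] <;>
                first | rfl | ac_rfl
            · simp [check, check_alt, pyMaxNE, pyEnumerate, List.find?, List.filter,
                  show List.range 3 = [0, 1, 2] from rfl, eq_false h0, eq_false (fun e => h0 (Eq.symm e)), eq_true h1, eq_true h1.symm, eq_true h2, eq_true h2.symm, eq_false h3, eq_false (fun e => h3 (Eq.symm e)), eq_false h4, eq_false (fun e => h4 (Eq.symm e))] <;>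
                first | rfl | ac_rfl
        · by_cases h3 : b = a3
          · by_cases h4 : b = a4
            · simp [check, check_alt, pyMaxNE, pyEnumerate, List.find?, List.filter,
                  show List.range 3 = [0, 1, 2] from rfl, eq_false h0, eq_false (fun e => h0 (Eq.symm e)), eq_true h1, eq_true h1.symm, eq_false h2, eq_false (fun e => h2 (Eq.symm e)), eq_true h3, eq_true h3.symm, eq_true h4, eq_true h4.symm] <;>
                first | rfl | ac_rfl
            · simp [check, check_alt, pyMaxNE, pyEnumerate, List.find?, List.filter,
                  show List.range 3 = [0, 1, 2] from rfl, eq_false h0, eq_false (fun e => h0 (Eq.symm e)), eq_true h1, eq_true h1.symm, eq_false h2, eq_false (fun e => h2 (Eq.symm e)), eq_true h3, eq_true h3.symm, eq_false h4, eq_false (fun e => h4 (Eq.symm e))] <;>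
                first | rfl | ac_rfl
          · by_cases h4 : b = a4
            · simp [check, check_alt, pyMaxNE, pyEnumerate, List.find?, List.filter,
                  show List.range 3 = [0, 1, 2] from rfl, eq_false h0, eq_false (fun e => h0 (Eq.symm e)), eq_true h1, eq_true h1.symm, eq_false h2, eq_false (fun e => h2 (Eq.symm e)), eq_false h3, eq_false (fun e => h3 (Eq.symm e)), eq_true h4, eq_true h4.symm] <;>
                first | rfl | ac_rfl
            · simp [check, check_alt, pyMaxNE, pyEnumerate, List.find?, List.filter,
                  show List.range 3 = [0, 1, 2] from rfl, eq_false h0, eq_false (fun e => h0 (Eq.symm e)), eq_true h1, eq_true h1.symm, eq_false h2, eq_false (fun e => h2 (Eq.symm e)), eq_false h3, eq_false (fun e => h3 (Eq.symm e)), eq_false h4, eq_false (fun e => h4 (Eq.symm e))] <;>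
                first | rfl | ac_rfl
      · by_cases h2 : b = a2
        · by_cases h3 : b = a3
          · by_cases h4 : b = a4
            · simp [check, check_alt, pyMaxNE, pyEnumerate, List.find?, List.filter,
                  show List.range 3 = [0, 1, 2] from rfl, eq_false h0, eq_false (fun e => h0 (Eq.symm e)), eq_false h1, eq_false (fun e => h1 (Eq.symm e)), eq_true h2, eq_true h2.symm, eq_true h3, eq_true h3.symm, eq_true h4, eq_true h4.symm] <;>
                first | rfl | ac_rfl
            · simp [check, check_alt, pyMaxNE, pyEnumerate, List.find?, List.filter,
                  show List.range 3 = [0, 1, 2] from rfl, eq_false h0, eq_false (fun e => h0 (Eq.symm e)), eq_false h1, eq_false (fun e => h1 (Eq.symm e)), eq_true h2, eq_true h2.symm, eq_true h3, eq_true h3.symm, eq_false h4, eq_false (fun e => h4 (Eq.symm e))] <;>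
                first | rfl | ac_rfl
          · by_cases h4 : b = a4
            · simp [check, check_alt, pyMaxNE, pyEnumerate, List.find?, List.filter,
                  show List.range 3 = [0, 1, 2] from rfl, eq_false h0, eq_false (fun e => h0 (Eq.symm e)), eq_false h1, eq_false (fun e => h1 (Eq.symm e)), eq_true h2, eq_true h2.symm, eq_false h3, eq_false (fun e => h3 (Eq.symm e)), eq_true h4, eq_true h4.symm] <;>
                first | rfl | ac_rfl
            · simp [check, check_alt, pyMaxNE, pyEnumerate, List.find?, List.filter,
                  show List.range 3 = [0, 1, 2] from rfl, eq_false h0, eq_false (fun e => h0 (Eq.symm e)), eq_false h1, eq_false (fun e => h1 (Eq.symm e)), eq_true h2, eq_true h2.symm, eq_false h3, eq_false (fun e => h3 (Eq.symm e)), eq_false h4, eq_false (fun e => h4 (Eq.symm e))] <;>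
                first | rfl | ac_rfl
        · by_cases h3 : b = a3
          · by_cases h4 : b = a4
            · simp [check, check_alt, pyMaxNE, pyEnumerate, List.find?, List.filter,
                  show List.range 3 = [0, 1, 2] from rfl, eq_false h0, eq_false (fun e => h0 (Eq.symm e)), eq_false h1, eq_false (fun e => h1 (Eq.symm e)), eq_false h2, eq_false (fun e => h2 (Eq.symm e)), eq_true h3, eq_true h3.symm, eq_true h4, eq_true h4.symm] <;>
                first | rfl | ac_rfl
            · simp [check, check_alt, pyMaxNE, pyEnumerate, List.find?, List.filter,
                  show List.range 3 = [0, 1, 2] from rfl, eq_false h0, eq_false (fun e => h0 (Eq.symm e)), eq_false h1, eq_false (fun e => h1 (Eq.symm e)), eq_false h2, eq_false (fun e => h2 (Eq.symm e)), eq_true h3, eq_true h3.symm, eq_false h4, eq_false (fun e => h4 (Eq.symm e))] <;>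
                first | rfl | ac_rfl
          · by_cases h4 : b = a4
            · simp [check, check_alt, pyMaxNE, pyEnumerate, List.find?, List.filter,
                  show List.range 3 = [0, 1, 2] from rfl, eq_false h0, eq_false (fun e => h0 (Eq.symm e)), eq_false h1, eq_false (fun e => h1 (Eq.symm e)), eq_false h2, eq_false (fun e => h2 (Eq.symm e)), eq_false h3, eq_false (fun e => h3 (Eq.symm e)), eq_true h4, eq_true h4.symm] <;>
                first | rfl | ac_rfl
            · simp [check, check_alt, pyMaxNE, pyEnumerate, List.find?, List.filter,
                  show List.range 3 = [0, 1, 2] from rfl, eq_false h0, eq_false (fun e => h0 (Eq.symm e)), eq_false h1, eq_false (fun e => h1 (Eq.symm e)), eq_false h2, eq_false (fun e => h2 (Eq.symm e)), eq_false h3, eq_false (fun e => h3 (Eq.symm e)), eq_false h4, eq_false (fun e => h4 (Eq.symm e))] <;>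
                first | rfl | ac_rfl
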